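-- pv_equiv track=rewrite | github.com/pandu926/dataset_generator_vllm | clean_and_merge.py | remove_thought_from_conversation
-- ===== SOURCE A (Python) =====
-- from typing import List, Dict
--
-- def remove_thought_from_conversation(conversation: List[Dict]) -> List[Dict]:
--     """Remove 'thought' field from all messages and filter consecutive model messages."""
--     cleaned = []
--     for msg in conversation:
--         # Skip messages that only contain thought (no actual content)
--         if msg.get("role") == "model" and "thought" in msg and not msg.get("content"):
--             continue
--
--         # Remove thought field but keep the message
--         clean_msg = {k: v for k, v in msg.items() if k != "thought"}
--
--         # Skip empty content after removing thought
--         if clean_msg.get("role") == "model" and clean_msg.get("content", "").startswith("I "):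
--             # This looks like a thought that was put in content field, check context
--             if len(clean_msg.get("content", "")) < 500 and any(x in clean_msg.get("content", "") for x in ["I'll ", "I need to", "I will", "I must"]):
--                 continue
--
--         cleaned.append(clean_msg)
--
--     # Remove consecutive model messages (keep only the last one)
--     final = []
--     for i, msg in enumerate(cleaned):
--         if i > 0 and msg.get("role") == "model" and cleaned[i-1].get("role") == "model":
--             # Replace previous model message
--             final[-1] = msg
--         else:
--             final.append(msg)
--
--     return final
-- ===== SOURCE B (Python) =====
-- def remove_thought_from_conversation(conversation):
--     """Single fused pass: clean each message and merge consecutive model messages on the fly."""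
--     final = []
--     for msg in conversation:
--         # thought-only model message: drop
--         if msg.get("role") == "model" and "thought" in msg and not msg.get("content"):
--             continue
--         clean = {k: v for k, v in msg.items() if k != "thought"}
--         content = clean.get("content", "")
--         # content that looks like a stray thought: drop
--         if (clean.get("role") == "model" and content.startswith("I ")
--                 and len(content) < 500
--                 and any(x in content for x in ["I'll ", "I need to", "I will", "I must"])):
--             continue
--         if final and clean.get("role") == "model" and final[-1].get("role") == "model":
--             final[-1] = clean   # keep only the last of consecutive model messages
--         else:
--             final.append(clean)
--     return final
-- ===== Notes on version B (the rewrite author's own statement) =====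
-- stated objective: simpler
-- what changed: The two passes (build a cleaned list, then re-scan it with enumerate and index arithmetic to merge consecutive model messages) are fused into one loop over the input that cleans each message and merges it with the tail of the output list directly, removing the intermediate list and the cleaned[i-1]/final[-1] index juggling.
import Mathlib
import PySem

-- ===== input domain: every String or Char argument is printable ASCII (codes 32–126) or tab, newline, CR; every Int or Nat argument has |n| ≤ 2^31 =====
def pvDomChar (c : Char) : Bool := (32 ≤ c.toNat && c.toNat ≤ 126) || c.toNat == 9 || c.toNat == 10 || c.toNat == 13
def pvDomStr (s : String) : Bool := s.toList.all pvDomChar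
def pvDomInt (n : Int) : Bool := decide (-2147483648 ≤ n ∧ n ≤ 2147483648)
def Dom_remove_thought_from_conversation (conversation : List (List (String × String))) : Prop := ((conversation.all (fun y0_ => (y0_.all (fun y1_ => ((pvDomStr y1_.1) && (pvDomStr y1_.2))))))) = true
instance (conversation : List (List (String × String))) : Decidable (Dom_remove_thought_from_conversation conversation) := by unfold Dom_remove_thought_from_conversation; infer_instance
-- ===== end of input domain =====

-- B fuses A's two passes (clean/filter, then merge consecutive model messages by re-scanning
-- with indices) into one loop that merges each surviving message with the output's tail directly.

-- ===== PORT A =====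
-- d.get(k): first-match lookup on the insertion-ordered association list
def pvGet? (d : List (String × String)) (k : String) : Option String :=
  (d.find? (fun kv => kv.1 == k)).map (·.2)

-- d.get(k, dflt)
def pvGetD (d : List (String × String)) (k : String) (dflt : String) : String :=
  (pvGet? d k).getD dflt

-- msg.get("role") == "model" and "thought" in msg and not msg.get("content")
def pvSkipThoughtOnly (msg : List (String × String)) : Bool :=
  (pvGet? msg "role" == some "model") && (pvGet? msg "thought").isSome
    && (pvGetD msg "content" "" == "")

-- {k: v for k, v in msg.items() if k != "thought"}  (dict keys are unique: a filter)
def pvClean (msg : List (String × String)) : List (String × String) :=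
  msg.filter (fun kv => kv.1 != "thought")

-- the 'looks like a thought placed in content' test (A's two nested ifs, both must hold to skip)
def pvSkipThoughtContent (c : List (String × String)) : Bool :=
  (pvGet? c "role" == some "model")
    && PySem.Str.startswith (pvGetD c "content" "") "I "
    && decide (PySem.Str.len (pvGetD c "content" "") < 500)
    && (PySem.Str.isIn "I'll " (pvGetD c "content" "")
        || PySem.Str.isIn "I need to" (pvGetD c "content" "")
        || PySem.Str.isIn "I will" (pvGetD c "content" "")
        || PySem.Str.isIn "I must" (pvGetD c "content" ""))

-- A's first loop: build `cleaned`
def pvPass1 (conversation : List (List (String × String))) : List (List (String × String)) :=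
  conversation.foldl (fun cleaned msg =>
    if pvSkipThoughtOnly msg then cleaned
    else
      let clean_msg := pvClean msg
      if pvSkipThoughtContent clean_msg then cleaned
      else cleaned ++ [clean_msg]) []

-- A's second loop: for i, msg in enumerate(cleaned): replace final[-1] or append
def pvPass2 (cleaned : List (List (String × String))) : List (List (String × String)) :=
  (PySem.List.enumerate cleaned 0).foldl (fun final p =>
    if decide (p.1 > 0) && (pvGet? p.2 "role" == some "model")
        && (pvGet? (PySem.List.pyGetD cleaned (p.1 - 1) []) "role" == some "model")
    then final.dropLast ++ [p.2]      -- final[-1] = msg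
    else final ++ [p.2]) []

def remove_thought_from_conversation (conversation : List (List (String × String))) :
    List (List (String × String)) :=
  pvPass2 (pvPass1 conversation)

-- ===== PORT B =====
-- merge one cleaned message with the output built so far (Source B's final[-1]/append step)
def pvStepMerge (final : List (List (String × String))) (c : List (String × String)) :
    List (List (String × String)) :=
  match final.getLast? with
  | some last =>
      if (pvGet? c "role" == some "model") && (pvGet? last "role" == some "model")
      then final.dropLast ++ [c]
      else final ++ [c]
  | none => final ++ [c]

def remove_thought_from_conversation_alt (conversation : List (List (String × String))) :
    List (List (String × String)) :=
  conversation.foldl (fun final msg =>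
    if pvSkipThoughtOnly msg then final
    else
      let c := pvClean msg
      if pvSkipThoughtContent c then final
      else pvStepMerge final c) []

-- ===== PRECONDITION & SPEC =====
def Spec_remove_thought_from_conversation (conversation : List (List (String × String))) (out : List (List (String × String))) : Prop := out = remove_thought_from_conversation_alt conversation
instance (conversation : List (List (String × String))) (out : List (List (String × String))) : Decidable (Spec_remove_thought_from_conversation conversation out) := by unfold Spec_remove_thought_from_conversation; infer_instance

-- ===== CLAIM (what is proved, stated in full; the proofs are below) =====
def Claim_equal_remove_thought_from_conversation : Prop := ∀ (conversation : List (List (String × String))), Dom_remove_thought_from_conversation conversation → Spec_remove_thought_from_conversation conversation (remove_thought_from_conversation conversation)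

-- ===== LEMMAS AND PROOFS =====

theorem merge_getLast? (a : List (List (String × String))) (x : List (String × String)) :
    (pvStepMerge a x).getLast? = some x := by
  unfold pvStepMerge
  cases a.getLast?
  · simp
  · split
    · split_ifs <;> simp
    · simp

-- appending one message to `cleaned` makes A's second pass take exactly B's merge step
theorem pass2_snoc (c : List (List (String × String))) (x : List (String × String))
    (h : (pvPass2 c).getLast? = c.getLast?) :
    pvPass2 (c ++ [x]) = pvStepMerge (pvPass2 c) x := by
  unfold pvPass2 pvStepMerge
  rw [PySem.List.enumerate_append, List.foldl_append]
  simp only [PySem.List.enumerate_cons, PySem.List.enumerate_nil, List.foldl_cons, List.foldl_nil]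
  -- the fold over the prefix does not see x
  have hcong :
      (PySem.List.enumerate c 0).foldl (fun final p =>
        if decide (p.1 > 0) && (pvGet? p.2 "role" == some "model")
            && (pvGet? (PySem.List.pyGetD (c ++ [x]) (p.1 - 1) []) "role" == some "model")
        then final.dropLast ++ [p.2] else final ++ [p.2]) []
      = (PySem.List.enumerate c 0).foldl (fun final p =>
        if decide (p.1 > 0) && (pvGet? p.2 "role" == some "model")
            && (pvGet? (PySem.List.pyGetD c (p.1 - 1) []) "role" == some "model")
        then final.dropLast ++ [p.2] else final ++ [p.2]) [] := by
    apply PySem.List.foldl_congr_mem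
    intro acc p hp
    obtain ⟨k, hk, rfl⟩ := (PySem.List.mem_enumerate_iff _ _ _).1 hp
    cases k with
    | zero => simp
    | succ k' =>
      have h1 : ((0 : Int) + (k' + 1 : Nat)) - 1 = ((k' : Nat) : Int) := by push_cast; ring
      rw [h1, PySem.List.pyGetD_natCast, PySem.List.pyGetD_natCast]
      have h2 : k' < c.length := by omega
      rw [List.getD_eq_getElem?_getD, List.getD_eq_getElem?_getD, List.getElem?_append_left h2]
  rw [hcong]
  cases c with
  | nil => simp
  | cons y ys =>
    have hlen : (0 : Int) + (y :: ys).length = (((y :: ys).length : Nat) : Int) := by ring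
    rw [hlen]
    have hpos : decide ((((y :: ys).length : Nat) : Int) > 0) = true := by
      simp
    have hidx : (((y :: ys).length : Nat) : Int) - 1 = (((y :: ys).length - 1 : Nat) : Int) := by
      push_cast [Nat.cast_sub (by simp : 1 ≤ (y :: ys).length)]; ring
    rw [hpos, hidx, PySem.List.pyGetD_natCast]
    have hlt : (y :: ys).length - 1 < (y :: ys).length := by simp
    have hget : ((y :: ys) ++ [x]).getD ((y :: ys).length - 1) [] = (y :: ys).getLast (by simp) := by
      rw [List.getD_eq_getElem?_getD, List.getElem?_append_left (by simp),
          List.getElem?_eq_getElem hlt, Option.getD_some, List.getLast_eq_getElem]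
    rw [hget]
    have hlast : (pvPass2 (y :: ys)).getLast? = some ((y :: ys).getLast (by simp)) := by
      rw [h]; exact List.getLast?_eq_some_getLast _
    -- reduce the RHS match using hlast
    have hP2 : pvPass2 (y :: ys)
        = (PySem.List.enumerate (y :: ys) 0).foldl (fun final p =>
            if decide (p.1 > 0) && (pvGet? p.2 "role" == some "model")
                && (pvGet? (PySem.List.pyGetD (y :: ys) (p.1 - 1) []) "role" == some "model")
            then final.dropLast ++ [p.2] else final ++ [p.2]) [] := rfl
    rw [← hP2, hlast]
    simp only [Bool.true_and]

-- A's second pass is exactly a left fold of B's merge step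
theorem pass2_foldl (c : List (List (String × String))) :
    pvPass2 c = c.foldl pvStepMerge [] ∧ (pvPass2 c).getLast? = c.getLast? := by
  induction c using List.reverseRecOn with
  | nil => exact ⟨rfl, rfl⟩
  | append_singleton c x ih =>
    have h1 := pass2_snoc c x ih.2
    refine ⟨by rw [h1, ih.1, List.foldl_append, List.foldl_cons, List.foldl_nil], ?_⟩
    rw [h1, merge_getLast?, List.getLast?_concat]

-- folding B's merge step over A's first pass gives exactly B's fused loop
theorem main_eq (conversation : List (List (String × String))) :
    List.foldl pvStepMerge [] (pvPass1 conversation)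
      = remove_thought_from_conversation_alt conversation := by
  unfold pvPass1 remove_thought_from_conversation_alt
  induction conversation using List.reverseRecOn with
  | nil => rfl
  | append_singleton conv m ih =>
    rw [List.foldl_append, List.foldl_append, List.foldl_cons, List.foldl_nil,
        List.foldl_cons, List.foldl_nil]
    by_cases h1 : pvSkipThoughtOnly m
    · simpa only [h1, if_true] using ih
    · by_cases h2 : pvSkipThoughtContent (pvClean m)
      · simpa only [h1, h2, if_true, if_false, Bool.false_eq_true] using ih
      · simp only [h1, h2, if_false, Bool.false_eq_true, List.foldl_append,
          List.foldl_cons, List.foldl_nil]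
        rw [ih]

-- ===== VERDICT (by name: the statement is the Claim_ definition above) =====
theorem remove_thought_from_conversation_spec : Claim_equal_remove_thought_from_conversation := by
  intro conversation _
  unfold Spec_remove_thought_from_conversation remove_thought_from_conversation
  rw [(pass2_foldl (pvPass1 conversation)).1, main_eq]
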